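-- pv_equiv track=rewrite | github.com/luffy2106/coding-exercises | interview/thales/exercise_2/solution.py | remaining_leaves
-- ===== SOURCE A (Python) =====
-- def remaining_leaves(width, height, leaves, winds):
--     """
--     Solution come up after 40 minutes, while required time is 20 minutes. Pay attention to the following things :
--     - pay attention to how matrix change, it will be row by row and col by col
--     - pay attention to how range(height-1,-1,-1) work : start :height-1, end : 0, step = -1
--     """
--     for wind in winds:
--         if wind == "U":
--             for row in range(height):
--                 for col in range(width):
--                     if row < height -1:
--                         leaves[row][col] = leaves[row+1][col]
--                     else:
--                         leaves[row][col] = 0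
--         elif wind == "D":
--             for row in range(height-1,-1,-1):
--                 for col in range(width):
--                     if row > 0:
--                         leaves[row][col] = leaves[row-1][col]
--                     else:
--                         leaves[row][col] = 0
--         elif wind == "R":
--             for row in range(height):
--                 for col in range(width-1,-1,-1):
--                     if col > 0:
--                         leaves[row][col] = leaves[row][col-1]
--                     else :
--                         leaves[row][col] = 0
--         elif wind == "L":
--             for row in range(height):
--                 for col in range(width):
--                     if col < width - 1:
--                         leaves[row][col] = leaves[row][col+1]
--                     else :
--                         leaves[row][col] = 0
--
--
--     remaining = sum(sum(row) for row in leaves)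
--
--     return remaining
-- ===== SOURCE B (Python) =====
-- def remaining_leaves(width, height, leaves, winds):
--     # The winds only ever shift the height x width field; leaves outside that
--     # field never move.  One pass over winds tracks the cumulative shift and
--     # its running extrema: a field cell keeps its leaves iff it lies in the
--     # rectangle [lo_r, hi_r) x [lo_c, hi_c).  Sum the whole grid, then remove
--     # what each field row loses, via row-slice sums clamped to the row.
--     # (Does not mutate `leaves`.)
--     r = c = min_r = max_r = min_c = max_c = 0
--     for wind in winds:
--         if wind == "U":
--             r += 1
--         elif wind == "D":
--             r -= 1
--         elif wind == "R":
--             c -= 1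
--         elif wind == "L":
--             c += 1
--         min_r = min(min_r, r)
--         max_r = max(max_r, r)
--         min_c = min(min_c, c)
--         max_c = max(max_c, c)
--     lo_r, hi_r = max_r, height + min_r
--     lo_c, hi_c = max_c, width + min_c
--     total = sum(sum(row) for row in leaves)
--     lost = 0
--     for i in range(min(height, len(leaves))):
--         row = leaves[i]
--         w = max(min(width, len(row)), 0)
--         field = sum(row[:w])
--         kept = sum(row[lo_c : max(min(hi_c, w), 0)]) if lo_r <= i < hi_r else 0
--         lost += field - kept
--     return total - lost
-- ===== Notes on version B (the rewrite author's own statement) =====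
-- stated objective: alternative
-- what changed: Instead of physically shifting the whole height-by-width field once per wind character, B scans winds once tracking the cumulative row/column shift and its running extrema, which determine the rectangle of field cells that survive every shift, then sums the whole grid and subtracts per field row what was blown out of that rectangle; Pre_ excludes exactly the inputs where A raises IndexError (a directional wind with a nonempty field the grid does not contain); A mutates leaves in place, B does not (the claim is about the return value).
import Mathlib
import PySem

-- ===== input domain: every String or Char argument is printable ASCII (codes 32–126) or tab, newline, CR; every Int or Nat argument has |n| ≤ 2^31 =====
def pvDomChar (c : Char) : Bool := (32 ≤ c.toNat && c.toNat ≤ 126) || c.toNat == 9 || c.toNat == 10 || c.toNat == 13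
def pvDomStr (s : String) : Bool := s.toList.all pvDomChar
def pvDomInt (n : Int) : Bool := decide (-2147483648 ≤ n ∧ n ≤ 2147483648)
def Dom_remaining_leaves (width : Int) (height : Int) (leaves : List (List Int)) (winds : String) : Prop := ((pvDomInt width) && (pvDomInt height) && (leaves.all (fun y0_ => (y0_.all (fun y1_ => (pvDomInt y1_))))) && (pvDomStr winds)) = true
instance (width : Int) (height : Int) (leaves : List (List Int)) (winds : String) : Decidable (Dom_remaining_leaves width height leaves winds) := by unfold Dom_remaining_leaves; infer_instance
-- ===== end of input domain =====

-- B replaces A's per-wind whole-grid shifting by one pass over `winds` (the cumulative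
-- shift offsets and their running extrema give the rectangle of field cells that survive)
-- plus one pass over the grid.  A mutates `leaves` in place, B does not; the claim is
-- about the return value only.

-- ===== PORT A =====
-- leaves[r][c] read / write; exact for the in-range non-negative indices A uses on Pre_
def pvGetCell (g : List (List Int)) (r c : Int) : Int :=
  PySem.List.pyGetD (PySem.List.pyGetD g r []) c 0
def pvSetCell (g : List (List Int)) (r c : Int) (x : Int) : List (List Int) :=
  PySem.List.pySetD g r (PySem.List.pySetD (PySem.List.pyGetD g r []) c x)

-- one iteration of A's `for wind in winds` loop (the four nested-loop in-place shifts)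
def pvWindStepA (width height : Int) (g : List (List Int)) (wind : Char) : List (List Int) :=
  if wind = 'U' then
    (PySem.List.pyRange 0 height 1).foldl (fun g row =>
      (PySem.List.pyRange 0 width 1).foldl (fun g col =>
        if row < height - 1 then pvSetCell g row col (pvGetCell g (row + 1) col)
        else pvSetCell g row col 0) g) g
  else if wind = 'D' then
    (PySem.List.pyRange (height - 1) (-1) (-1)).foldl (fun g row =>
      (PySem.List.pyRange 0 width 1).foldl (fun g col =>
        if row > 0 then pvSetCell g row col (pvGetCell g (row - 1) col)
        else pvSetCell g row col 0) g) g
  else if wind = 'R' then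
    (PySem.List.pyRange 0 height 1).foldl (fun g row =>
      (PySem.List.pyRange (width - 1) (-1) (-1)).foldl (fun g col =>
        if col > 0 then pvSetCell g row col (pvGetCell g row (col - 1))
        else pvSetCell g row col 0) g) g
  else if wind = 'L' then
    (PySem.List.pyRange 0 height 1).foldl (fun g row =>
      (PySem.List.pyRange 0 width 1).foldl (fun g col =>
        if col < width - 1 then pvSetCell g row col (pvGetCell g row (col + 1))
        else pvSetCell g row col 0) g) g
  else g

def remaining_leaves (width : Int) (height : Int) (leaves : List (List Int)) (winds : String) : Int :=
  let g := winds.toList.foldl (pvWindStepA width height) leaves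
  (g.map (fun row => row.sum)).sum

-- ===== PORT B =====
-- one iteration of Source B's wind loop on the state (r, c, min_r, max_r, min_c, max_c)
def pvOffStep (s : Int × Int × Int × Int × Int × Int) (wind : Char) : Int × Int × Int × Int × Int × Int :=
  let rc : Int × Int :=
    if wind = 'U' then (s.1 + 1, s.2.1)
    else if wind = 'D' then (s.1 - 1, s.2.1)
    else if wind = 'R' then (s.1, s.2.1 - 1)
    else if wind = 'L' then (s.1, s.2.1 + 1)
    else (s.1, s.2.1)
  (rc.1, rc.2, min s.2.2.1 rc.1, max s.2.2.2.1 rc.1, min s.2.2.2.2.1 rc.2, max s.2.2.2.2.2 rc.2)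

def pvOffsets (winds : List Char) : Int × Int × Int × Int × Int × Int :=
  winds.foldl pvOffStep (0, 0, 0, 0, 0, 0)

-- Source B: total = sum of the whole grid; lost = what each field row loses, via row-slice
-- sums clamped to the row (leaves[i] → pyGetD: the loop bound keeps i in range)
def remaining_leaves_alt (width : Int) (height : Int) (leaves : List (List Int)) (winds : String) : Int :=
  let s := pvOffsets winds.toList
  let total := (leaves.map (fun row => row.sum)).sum
  let lost := (PySem.List.pyRange 0 (min height (leaves.length : Int)) 1).foldl (fun lost i =>
    let row := PySem.List.pyGetD leaves i []
    let w := max (min width (row.length : Int)) 0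
    let field := (PySem.List.slice row none (some w)).sum
    let kept := if s.2.2.2.1 ≤ i ∧ i < height + s.2.2.1 then
        (PySem.List.slice row (some s.2.2.2.2.2) (some (max (min (width + s.2.2.2.2.1) w) 0))).sum
      else 0
    lost + (field - kept)) 0
  total - lost

-- ===== PRECONDITION & SPEC =====
-- Pre_ excludes exactly the inputs on which A raises IndexError: a directional wind with a
-- nonempty height×width field that the grid does not contain.
def Pre_remaining_leaves (width : Int) (height : Int) (leaves : List (List Int)) (winds : String) : Prop :=
  (winds.toList.any (fun d => d == 'U' || d == 'D' || d == 'R' || d == 'L') = true ∧ 0 < height ∧ 0 < width) →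
    (height ≤ (leaves.length : Int) ∧ ∀ row ∈ leaves.take height.toNat, width ≤ (row.length : Int))
instance (width : Int) (height : Int) (leaves : List (List Int)) (winds : String) : Decidable (Pre_remaining_leaves width height leaves winds) := by unfold Pre_remaining_leaves; infer_instance
def pvWitness_remaining_leaves : Int × Int × List (List Int) × String := (2, 2, [[1, 2], [3, 4]], "UL")
def Spec_remaining_leaves (width : Int) (height : Int) (leaves : List (List Int)) (winds : String) (out : Int) : Prop := out = remaining_leaves_alt width height leaves winds
instance (width : Int) (height : Int) (leaves : List (List Int)) (winds : String) (out : Int) : Decidable (Spec_remaining_leaves width height leaves winds out) := by unfold Spec_remaining_leaves; infer_instance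

-- ===== CLAIM (what is proved, stated in full; the proofs are below) =====
def Claim_equal_remaining_leaves : Prop := ∀ (width : Int) (height : Int) (leaves : List (List Int)) (winds : String), Dom_remaining_leaves width height leaves winds → Pre_remaining_leaves width height leaves winds → Spec_remaining_leaves width height leaves winds (remaining_leaves width height leaves winds)
-- ===== LEMMAS AND PROOFS =====

-- Nat-indexed view of the grid
def pvCell (g : List (List Int)) (i j : Nat) : Int := (g.getD i []).getD j 0
def pvRL (g : List (List Int)) (i : Nat) : Nat := (g.getD i []).length
def pvSetN (g : List (List Int)) (r c : Nat) (x : Int) : List (List Int) :=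
  g.set r ((g.getD r []).set c x)
-- the grid contains the H×W wind field (rows may be longer, extra rows may follow)
def pvWindowed (g : List (List Int)) (H W : Nat) : Prop :=
  H ≤ g.length ∧ ∀ i < H, W ≤ pvRL g i

theorem pvGetCell_nat (g : List (List Int)) (r c : Int) (hr : 0 ≤ r) (hc : 0 ≤ c) :
    pvGetCell g r c = pvCell g r.toNat c.toNat := by
  simp [pvGetCell, pvCell, PySem.List.pyGetD_of_nonneg _ _ hr, PySem.List.pyGetD_of_nonneg _ _ hc]

theorem pvSetCell_nat (g : List (List Int)) (r c x : Int) (hr : 0 ≤ r) (hc : 0 ≤ c) :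
    pvSetCell g r c x = pvSetN g r.toNat c.toNat x := by
  simp [pvSetCell, pvSetN, PySem.List.pySetD_of_nonneg _ _ hr, PySem.List.pySetD_of_nonneg _ _ hc,
        PySem.List.pyGetD_of_nonneg _ _ hr]

theorem pvLen_setN (g : List (List Int)) (r c : Nat) (x : Int) :
    (pvSetN g r c x).length = g.length := by simp [pvSetN]

theorem pvRL_setN (g : List (List Int)) (r c : Nat) (x : Int) (i : Nat) :
    pvRL (pvSetN g r c x) i = pvRL g i := by
  simp only [pvRL, pvSetN, List.getD_eq_getElem?_getD, List.getElem?_set]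
  by_cases h1 : r = i
  · subst h1
    by_cases h2 : r < g.length
    · simp [h2, List.getElem?_eq_getElem h2]
    · simp [h2]
  · simp [h1]

theorem pvCell_setN (g : List (List Int)) (r c : Nat) (x : Int) (i j : Nat) :
    pvCell (pvSetN g r c x) i j =
      if i = r ∧ j = c ∧ r < g.length ∧ c < pvRL g r then x else pvCell g i j := by
  simp only [pvCell, pvRL, pvSetN, List.getD_eq_getElem?_getD, List.getElem?_set]
  by_cases h1 : r = i
  · subst h1
    by_cases h2 : r < g.length
    · simp only [h2, if_true, List.getElem?_eq_getElem h2, Option.getD_some]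
      by_cases h3 : c = j
      · subst h3
        by_cases h4 : c < (g[r]).length
        · simp [h4, List.getElem?_eq_getElem h4]
        · simp [h4]
      · simp [Ne.symm h3, h3, List.getElem?_eq_getElem h2]
    · simp [h2]
  · simp [h1, Ne.symm h1]

-- generic in-place writer: each position gets the value read (from the current grid) at
-- its source cell; if each source is never among the earlier-written positions, the
-- result reads all sources from the START grid
def pvSrcVal (g : List (List Int)) : Option (Nat × Nat) → Int
  | some q => pvCell g q.1 q.2
  | none => 0

def pvWrites (src : Nat × Nat → Option (Nat × Nat)) (g : List (List Int)) (ps : List (Nat × Nat)) : List (List Int) :=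
  ps.foldl (fun g p => pvSetN g p.1 p.2 (pvSrcVal g (src p))) g

theorem pvLen_writes (src : Nat × Nat → Option (Nat × Nat)) (ps : List (Nat × Nat)) (g : List (List Int)) :
    (pvWrites src g ps).length = g.length := by
  induction ps generalizing g with
  | nil => rfl
  | cons p ps ih => simp [pvWrites, List.foldl_cons] at *; rw [ih, pvLen_setN]

theorem pvRL_writes (src : Nat × Nat → Option (Nat × Nat)) (ps : List (Nat × Nat)) (g : List (List Int)) (i : Nat) :
    pvRL (pvWrites src g ps) i = pvRL g i := by
  induction ps generalizing g with
  | nil => rfl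
  | cons p ps ih => simp [pvWrites, List.foldl_cons] at *; rw [ih, pvRL_setN]

theorem pvWrites_cell (src : Nat × Nat → Option (Nat × Nat)) (ps : List (Nat × Nat))
    (hps : ps.Pairwise (fun p q => src q ≠ some p)) (g : List (List Int)) (i j : Nat) :
    pvCell (pvWrites src g ps) i j =
      if (i, j) ∈ ps ∧ i < g.length ∧ j < pvRL g i then pvSrcVal g (src (i, j))
      else pvCell g i j := by
  induction ps generalizing g with
  | nil => simp [pvWrites]
  | cons p ps ih =>
    rcases List.pairwise_cons.mp hps with ⟨hhead, htail⟩
    have hg1 : pvWrites src g (p :: ps) = pvWrites src (pvSetN g p.1 p.2 (pvSrcVal g (src p))) ps := by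
      simp [pvWrites]
    set g1 := pvSetN g p.1 p.2 (pvSrcVal g (src p)) with hg1def
    rw [hg1, ih htail]
    have hlen : g1.length = g.length := pvLen_setN ..
    have hrl : ∀ k, pvRL g1 k = pvRL g k := fun k => pvRL_setN ..
    by_cases hmem : (i, j) ∈ ps
    · have hsrc : src (i, j) ≠ some p := hhead _ hmem
      have hval : pvSrcVal g1 (src (i, j)) = pvSrcVal g (src (i, j)) := by
        cases hq : src (i, j) with
        | none => simp [pvSrcVal]
        | some q =>
          simp only [pvSrcVal, hg1def, pvCell_setN]
          have : ¬(q.1 = p.1 ∧ q.2 = p.2 ∧ p.1 < g.length ∧ p.2 < pvRL g p.1) := by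
            rintro ⟨h1, h2, -⟩
            exact hsrc (by rw [hq]; congr 1; exact Prod.ext h1 h2)
          rw [if_neg this]
      rw [hlen]
      conv_lhs => rw [hrl i]
      by_cases hr : i < g.length ∧ j < pvRL g i
      · rw [if_pos ⟨hmem, hr.1, hr.2⟩, hval,
            if_pos ⟨List.mem_cons_of_mem _ hmem, hr.1, hr.2⟩]
      · rw [if_neg (by tauto), if_neg (by tauto), hg1def, pvCell_setN]
        have : ¬(i = p.1 ∧ j = p.2 ∧ p.1 < g.length ∧ p.2 < pvRL g p.1) := by
          rintro ⟨h1, h2, h3, h4⟩; subst h1; subst h2; exact hr ⟨h3, h4⟩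
        rw [if_neg this]
    · rw [hlen]
      conv_lhs => rw [hrl i]
      rw [if_neg (by rintro ⟨hm, -⟩; exact hmem hm), hg1def, pvCell_setN]
      by_cases hp : (i, j) = p
      · have h1 : i = p.1 := by rw [← hp]
        have h2 : j = p.2 := by rw [← hp]
        subst h1; subst h2
        by_cases hr : p.1 < g.length ∧ p.2 < pvRL g p.1
        · rw [if_pos ⟨rfl, rfl, hr.1, hr.2⟩,
              if_pos ⟨List.mem_cons_self .., hr.1, hr.2⟩]
        · rw [if_neg (by tauto), if_neg (by tauto)]
      · have hne : ¬(i = p.1 ∧ j = p.2 ∧ p.1 < g.length ∧ p.2 < pvRL g p.1) := by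
          rintro ⟨h1, h2, -⟩; exact hp (Prod.ext h1 h2)
        rw [if_neg hne, if_neg (by
          rintro ⟨hm, hr1, hr2⟩
          rcases List.mem_cons.mp hm with h | h
          · exact hp h
          · exact hmem h)]


-- ----- each directional wind step is a pvWrites over a fixed write order -----
def pvPosAsc (H W : Nat) : List (Nat × Nat) :=
  (List.range H).flatMap (fun i => (List.range W).map (fun j => (i, j)))
def pvPosRowsDesc (H W : Nat) : List (Nat × Nat) :=
  (List.range H).flatMap (fun k => (List.range W).map (fun j => (H - 1 - k, j)))
def pvPosColsDesc (H W : Nat) : List (Nat × Nat) :=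
  (List.range H).flatMap (fun i => (List.range W).map (fun k => (i, W - 1 - k)))

theorem mem_pvPosAsc (H W i j : Nat) : (i, j) ∈ pvPosAsc H W ↔ i < H ∧ j < W := by
  simp [pvPosAsc]
theorem mem_pvPosRowsDesc (H W i j : Nat) : (i, j) ∈ pvPosRowsDesc H W ↔ i < H ∧ j < W := by
  simp only [pvPosRowsDesc, List.mem_flatMap, List.mem_map, List.mem_range, Prod.mk.injEq]
  constructor
  · rintro ⟨k, hk, j', hj', h1, h2⟩; omega
  · rintro ⟨hi, hj⟩; exact ⟨H - 1 - i, by omega, j, hj, by omega, rfl⟩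
theorem mem_pvPosColsDesc (H W i j : Nat) : (i, j) ∈ pvPosColsDesc H W ↔ i < H ∧ j < W := by
  simp only [pvPosColsDesc, List.mem_flatMap, List.mem_map, List.mem_range, Prod.mk.injEq]
  constructor
  · rintro ⟨i', hi', k, hk, h1, h2⟩; omega
  · rintro ⟨hi, hj⟩; exact ⟨i, hi, W - 1 - j, by omega, rfl, by omega⟩

theorem pairwise_pvPosAsc (H W : Nat) :
    (pvPosAsc H W).Pairwise (fun p q => p.1 < q.1 ∨ (p.1 = q.1 ∧ p.2 < q.2)) := by
  rw [pvPosAsc, List.pairwise_flatMap]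
  refine ⟨fun a _ => ?_, List.pairwise_lt_range.imp ?_⟩
  · rw [List.pairwise_map]
    exact List.pairwise_lt_range.imp (fun h => Or.inr ⟨rfl, h⟩)
  · intro a b hab
    rintro x hx y hy
    simp only [List.mem_map, List.mem_range] at hx hy
    obtain ⟨jx, -, rfl⟩ := hx; obtain ⟨jy, -, rfl⟩ := hy
    exact Or.inl hab

theorem pairwise_pvPosRowsDesc (H W : Nat) :
    (pvPosRowsDesc H W).Pairwise (fun p q => q.1 < p.1 ∨ (p.1 = q.1 ∧ p.2 < q.2)) := by
  rw [pvPosRowsDesc, List.pairwise_flatMap]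
  refine ⟨fun a ha => ?_, ?_⟩
  · rw [List.pairwise_map]
    exact List.pairwise_lt_range.imp (fun h => Or.inr ⟨rfl, h⟩)
  · refine List.Pairwise.imp_of_mem ?_ List.pairwise_lt_range
    intro a b ha hb hab x hx y hy
    rw [List.mem_range] at ha hb
    simp only [List.mem_map, List.mem_range] at hx hy
    obtain ⟨jx, hjx, rfl⟩ := hx; obtain ⟨jy, hjy, rfl⟩ := hy
    exact Or.inl (by omega)

theorem pairwise_pvPosColsDesc (H W : Nat) :
    (pvPosColsDesc H W).Pairwise (fun p q => p.1 < q.1 ∨ (p.1 = q.1 ∧ q.2 < p.2)) := by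
  rw [pvPosColsDesc, List.pairwise_flatMap]
  refine ⟨fun a ha => ?_, List.pairwise_lt_range.imp ?_⟩
  · rw [List.pairwise_map]
    refine List.Pairwise.imp_of_mem ?_ List.pairwise_lt_range
    intro x y hx hy hxy
    rw [List.mem_range] at hx hy
    exact Or.inr ⟨rfl, by omega⟩
  · intro a b hab x hx y hy
    simp only [List.mem_map, List.mem_range] at hx hy
    obtain ⟨jx, -, rfl⟩ := hx; obtain ⟨jy, -, rfl⟩ := hy
    exact Or.inl hab

def pvSrcU (H : Nat) (p : Nat × Nat) : Option (Nat × Nat) :=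
  if p.1 + 1 < H then some (p.1 + 1, p.2) else none
def pvSrcD (p : Nat × Nat) : Option (Nat × Nat) :=
  if 1 ≤ p.1 then some (p.1 - 1, p.2) else none
def pvSrcR (p : Nat × Nat) : Option (Nat × Nat) :=
  if 1 ≤ p.2 then some (p.1, p.2 - 1) else none
def pvSrcL (W : Nat) (p : Nat × Nat) : Option (Nat × Nat) :=
  if p.2 + 1 < W then some (p.1, p.2 + 1) else none

theorem stepU_eq (width height : Int) (hh : 0 ≤ height) (g : List (List Int)) :
    pvWindStepA width height g 'U' =
      pvWrites (pvSrcU height.toNat) g (pvPosAsc height.toNat width.toNat) := by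
  unfold pvWindStepA
  rw [if_pos rfl, PySem.List.pyRange_one 0 height, PySem.List.pyRange_one 0 width,
      pvWrites, pvPosAsc, List.foldl_flatMap, List.foldl_map]
  simp only [Int.sub_zero]
  apply PySem.List.foldl_congr_mem
  intro acc i _
  rw [List.foldl_map, List.foldl_map]
  apply PySem.List.foldl_congr_mem
  intro acc2 j _
  simp only [zero_add, pvSrcU]
  by_cases h : i + 1 < height.toNat
  · rw [if_pos (by omega), if_pos h]
    rw [pvSetCell_nat _ _ _ _ (by omega) (by omega),
        pvGetCell_nat _ _ _ (by omega) (by omega)]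
    simp [pvSrcVal]
    try (congr 1 <;> omega)
  · rw [if_neg (by omega), if_neg h]
    rw [pvSetCell_nat _ _ _ _ (by omega) (by omega)]
    simp [pvSrcVal]
    try (congr 1 <;> omega)

theorem stepD_eq (width height : Int) (hh : 0 ≤ height) (g : List (List Int)) :
    pvWindStepA width height g 'D' =
      pvWrites pvSrcD g (pvPosRowsDesc height.toNat width.toNat) := by
  unfold pvWindStepA
  rw [if_neg (by decide), if_pos rfl, PySem.List.pyRange_neg_one (height - 1) (-1),
      PySem.List.pyRange_one 0 width,
      pvWrites, pvPosRowsDesc, List.foldl_flatMap, List.foldl_map]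
  simp only [Int.sub_zero]
  have hlen : (height - 1 - -1).toNat = height.toNat := by omega
  rw [hlen]
  apply PySem.List.foldl_congr_mem
  intro acc k hk
  rw [List.mem_range] at hk
  rw [List.foldl_map, List.foldl_map]
  apply PySem.List.foldl_congr_mem
  intro acc2 j _
  simp only [zero_add, pvSrcD]
  have hrow : height - 1 - (k : Int) = ((height.toNat - 1 - k : Nat) : Int) := by omega
  rw [hrow]
  by_cases h : 1 ≤ height.toNat - 1 - k
  · rw [if_pos (by omega), if_pos h]
    rw [pvSetCell_nat _ _ _ _ (by omega) (by omega),
        pvGetCell_nat _ _ _ (by omega) (by omega)]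
    simp [pvSrcVal]
    try (congr 1 <;> omega)
  · rw [if_neg (by omega), if_neg h]
    rw [pvSetCell_nat _ _ _ _ (by omega) (by omega)]
    simp [pvSrcVal]
    try (congr 1 <;> omega)

theorem stepR_eq (width height : Int) (hh : 0 ≤ height) (g : List (List Int)) :
    pvWindStepA width height g 'R' =
      pvWrites pvSrcR g (pvPosColsDesc height.toNat width.toNat) := by
  unfold pvWindStepA
  rw [if_neg (by decide), if_neg (by decide), if_pos rfl,
      PySem.List.pyRange_one 0 height, PySem.List.pyRange_neg_one (width - 1) (-1),
      pvWrites, pvPosColsDesc, List.foldl_flatMap, List.foldl_map]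
  simp only [Int.sub_zero]
  have hlen : (width - 1 - -1).toNat = width.toNat := by omega
  rw [hlen]
  apply PySem.List.foldl_congr_mem
  intro acc i _
  rw [List.foldl_map, List.foldl_map]
  apply PySem.List.foldl_congr_mem
  intro acc2 k hk
  rw [List.mem_range] at hk
  simp only [zero_add, pvSrcR]
  have hcol : width - 1 - (k : Int) = ((width.toNat - 1 - k : Nat) : Int) := by omega
  rw [hcol]
  by_cases h : 1 ≤ width.toNat - 1 - k
  · rw [if_pos (by omega), if_pos h]
    rw [pvSetCell_nat _ _ _ _ (by omega) (by omega),
        pvGetCell_nat _ _ _ (by omega) (by omega)]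
    simp [pvSrcVal]
    try (congr 1 <;> omega)
  · rw [if_neg (by omega), if_neg h]
    rw [pvSetCell_nat _ _ _ _ (by omega) (by omega)]
    simp [pvSrcVal]
    try (congr 1 <;> omega)

theorem stepL_eq (width height : Int) (hw : 0 ≤ width) (g : List (List Int)) :
    pvWindStepA width height g 'L' =
      pvWrites (pvSrcL width.toNat) g (pvPosAsc height.toNat width.toNat) := by
  unfold pvWindStepA
  rw [if_neg (by decide), if_neg (by decide), if_neg (by decide), if_pos rfl,
      PySem.List.pyRange_one 0 height, PySem.List.pyRange_one 0 width,
      pvWrites, pvPosAsc, List.foldl_flatMap, List.foldl_map]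
  simp only [Int.sub_zero]
  apply PySem.List.foldl_congr_mem
  intro acc i _
  rw [List.foldl_map, List.foldl_map]
  apply PySem.List.foldl_congr_mem
  intro acc2 j _
  simp only [zero_add, pvSrcL]
  by_cases h : j + 1 < width.toNat
  · rw [if_pos (by omega), if_pos h]
    rw [pvSetCell_nat _ _ _ _ (by omega) (by omega),
        pvGetCell_nat _ _ _ (by omega) (by omega)]
    simp [pvSrcVal]
    try (congr 1 <;> omega)
  · rw [if_neg (by omega), if_neg h]
    rw [pvSetCell_nat _ _ _ _ (by omega) (by omega)]
    simp [pvSrcVal]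
    try (congr 1 <;> omega)

theorem step_other (width height : Int) (g : List (List Int)) (d : Char)
    (h1 : d ≠ 'U') (h2 : d ≠ 'D') (h3 : d ≠ 'R') (h4 : d ≠ 'L') :
    pvWindStepA width height g d = g := by
  unfold pvWindStepA
  rw [if_neg h1, if_neg h2, if_neg h3, if_neg h4]


-- ----- per-wind cell characterisation on a shaped grid -----
theorem cell_stepU (width height : Int) (hh : 0 ≤ height) (hw : 0 ≤ width)
    (g : List (List Int)) (hs : pvWindowed g height.toNat width.toNat)
    (i j : Nat) (hi : i < height.toNat) (hj : j < width.toNat) :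
    pvCell (pvWindStepA width height g 'U') i j =
      if i + 1 < height.toNat then pvCell g (i + 1) j else 0 := by
  rw [stepU_eq width height hh g,
      pvWrites_cell _ _ ((pairwise_pvPosAsc _ _).imp (by
        rintro ⟨p1, p2⟩ ⟨q1, q2⟩ hpq
        simp only [pvSrcU]
        split
        · simp only [ne_eq, Option.some.injEq, Prod.mk.injEq, not_and]
          rintro rfl rfl
          rcases hpq with h | ⟨h1, h2⟩ <;> omega
        · simp)),
      if_pos ⟨(mem_pvPosAsc _ _ _ _).mpr ⟨hi, hj⟩, lt_of_lt_of_le hi hs.1, lt_of_lt_of_le hj (hs.2 i hi)⟩]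
  simp only [pvSrcU]
  split <;> simp [pvSrcVal]

theorem cell_stepD (width height : Int) (hh : 0 ≤ height) (hw : 0 ≤ width)
    (g : List (List Int)) (hs : pvWindowed g height.toNat width.toNat)
    (i j : Nat) (hi : i < height.toNat) (hj : j < width.toNat) :
    pvCell (pvWindStepA width height g 'D') i j =
      if 1 ≤ i then pvCell g (i - 1) j else 0 := by
  rw [stepD_eq width height hh g,
      pvWrites_cell _ _ ((pairwise_pvPosRowsDesc _ _).imp (by
        rintro ⟨p1, p2⟩ ⟨q1, q2⟩ hpq
        simp only [pvSrcD]
        split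
        · simp only [ne_eq, Option.some.injEq, Prod.mk.injEq, not_and]
          rintro rfl rfl
          rcases hpq with h | ⟨h1, h2⟩ <;> omega
        · simp)),
      if_pos ⟨(mem_pvPosRowsDesc _ _ _ _).mpr ⟨hi, hj⟩, lt_of_lt_of_le hi hs.1, lt_of_lt_of_le hj (hs.2 i hi)⟩]
  simp only [pvSrcD]
  split <;> simp [pvSrcVal]

theorem cell_stepR (width height : Int) (hh : 0 ≤ height) (hw : 0 ≤ width)
    (g : List (List Int)) (hs : pvWindowed g height.toNat width.toNat)
    (i j : Nat) (hi : i < height.toNat) (hj : j < width.toNat) :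
    pvCell (pvWindStepA width height g 'R') i j =
      if 1 ≤ j then pvCell g i (j - 1) else 0 := by
  rw [stepR_eq width height hh g,
      pvWrites_cell _ _ ((pairwise_pvPosColsDesc _ _).imp (by
        rintro ⟨p1, p2⟩ ⟨q1, q2⟩ hpq
        simp only [pvSrcR]
        split
        · simp only [ne_eq, Option.some.injEq, Prod.mk.injEq, not_and]
          rintro rfl rfl
          rcases hpq with h | ⟨h1, h2⟩ <;> omega
        · simp)),
      if_pos ⟨(mem_pvPosColsDesc _ _ _ _).mpr ⟨hi, hj⟩, lt_of_lt_of_le hi hs.1, lt_of_lt_of_le hj (hs.2 i hi)⟩]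
  simp only [pvSrcR]
  split <;> simp [pvSrcVal]

theorem cell_stepL (width height : Int) (hh : 0 ≤ height) (hw : 0 ≤ width)
    (g : List (List Int)) (hs : pvWindowed g height.toNat width.toNat)
    (i j : Nat) (hi : i < height.toNat) (hj : j < width.toNat) :
    pvCell (pvWindStepA width height g 'L') i j =
      if j + 1 < width.toNat then pvCell g i (j + 1) else 0 := by
  rw [stepL_eq width height hw g,
      pvWrites_cell _ _ ((pairwise_pvPosAsc _ _).imp (by
        rintro ⟨p1, p2⟩ ⟨q1, q2⟩ hpq
        simp only [pvSrcL]
        split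
        · simp only [ne_eq, Option.some.injEq, Prod.mk.injEq, not_and]
          rintro rfl rfl
          rcases hpq with h | ⟨h1, h2⟩ <;> omega
        · simp)),
      if_pos ⟨(mem_pvPosAsc _ _ _ _).mpr ⟨hi, hj⟩, lt_of_lt_of_le hi hs.1, lt_of_lt_of_le hj (hs.2 i hi)⟩]
  simp only [pvSrcL]
  split <;> simp [pvSrcVal]

-- a wind step changes neither the number of rows nor any row length
theorem pvDims_step (width height : Int) (hh : 0 ≤ height) (hw : 0 ≤ width)
    (g : List (List Int)) (d : Char) :
    (pvWindStepA width height g d).length = g.length ∧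
    ∀ i, pvRL (pvWindStepA width height g d) i = pvRL g i := by
  by_cases hU : d = 'U'
  · subst hU; rw [stepU_eq width height hh g]
    exact ⟨pvLen_writes .., fun i => pvRL_writes ..⟩
  by_cases hD : d = 'D'
  · subst hD; rw [stepD_eq width height hh g]
    exact ⟨pvLen_writes .., fun i => pvRL_writes ..⟩
  by_cases hR : d = 'R'
  · subst hR; rw [stepR_eq width height hh g]
    exact ⟨pvLen_writes .., fun i => pvRL_writes ..⟩
  by_cases hL : d = 'L'
  · subst hL; rw [stepL_eq width height hw g]
    exact ⟨pvLen_writes .., fun i => pvRL_writes ..⟩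
  rw [step_other width height g d hU hD hR hL]
  exact ⟨rfl, fun _ => rfl⟩

-- a wind step never touches a cell outside the H×W field
theorem cell_step_out (width height : Int) (hh : 0 ≤ height) (hw : 0 ≤ width)
    (g : List (List Int)) (d : Char) (i j : Nat)
    (hout : ¬(i < height.toNat ∧ j < width.toNat)) :
    pvCell (pvWindStepA width height g d) i j = pvCell g i j := by
  by_cases hU : d = 'U'
  · subst hU
    rw [stepU_eq width height hh g,
        pvWrites_cell _ _ ((pairwise_pvPosAsc _ _).imp (by
          rintro ⟨p1, p2⟩ ⟨q1, q2⟩ hpq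
          simp only [pvSrcU]
          split
          · simp only [ne_eq, Option.some.injEq, Prod.mk.injEq, not_and]
            rintro rfl rfl
            rcases hpq with h | ⟨h1, h2⟩ <;> omega
          · simp)),
        if_neg (by rintro ⟨hmem, -⟩; exact hout ((mem_pvPosAsc _ _ _ _).mp hmem))]
  by_cases hD : d = 'D'
  · subst hD
    rw [stepD_eq width height hh g,
        pvWrites_cell _ _ ((pairwise_pvPosRowsDesc _ _).imp (by
          rintro ⟨p1, p2⟩ ⟨q1, q2⟩ hpq
          simp only [pvSrcD]
          split
          · simp only [ne_eq, Option.some.injEq, Prod.mk.injEq, not_and]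
            rintro rfl rfl
            rcases hpq with h | ⟨h1, h2⟩ <;> omega
          · simp)),
        if_neg (by rintro ⟨hmem, -⟩; exact hout ((mem_pvPosRowsDesc _ _ _ _).mp hmem))]
  by_cases hR : d = 'R'
  · subst hR
    rw [stepR_eq width height hh g,
        pvWrites_cell _ _ ((pairwise_pvPosColsDesc _ _).imp (by
          rintro ⟨p1, p2⟩ ⟨q1, q2⟩ hpq
          simp only [pvSrcR]
          split
          · simp only [ne_eq, Option.some.injEq, Prod.mk.injEq, not_and]
            rintro rfl rfl
            rcases hpq with h | ⟨h1, h2⟩ <;> omega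
          · simp)),
        if_neg (by rintro ⟨hmem, -⟩; exact hout ((mem_pvPosColsDesc _ _ _ _).mp hmem))]
  by_cases hL : d = 'L'
  · subst hL
    rw [stepL_eq width height hw g,
        pvWrites_cell _ _ ((pairwise_pvPosAsc _ _).imp (by
          rintro ⟨p1, p2⟩ ⟨q1, q2⟩ hpq
          simp only [pvSrcL]
          split
          · simp only [ne_eq, Option.some.injEq, Prod.mk.injEq, not_and]
            rintro rfl rfl
            rcases hpq with h | ⟨h1, h2⟩ <;> omega
          · simp)),
        if_neg (by rintro ⟨hmem, -⟩; exact hout ((mem_pvPosAsc _ _ _ _).mp hmem))]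
  rw [step_other width height g d hU hD hR hL]

theorem shaped_step (width height : Int) (hh : 0 ≤ height) (hw : 0 ≤ width)
    (g : List (List Int)) (d : Char) (hs : pvWindowed g height.toNat width.toNat) :
    pvWindowed (pvWindStepA width height g d) height.toNat width.toNat := by
  by_cases hU : d = 'U'
  · subst hU; rw [stepU_eq width height hh g]
    exact ⟨by rw [pvLen_writes]; exact hs.1, fun i hi => by rw [pvRL_writes]; exact hs.2 i hi⟩
  by_cases hD : d = 'D'
  · subst hD; rw [stepD_eq width height hh g]
    exact ⟨by rw [pvLen_writes]; exact hs.1, fun i hi => by rw [pvRL_writes]; exact hs.2 i hi⟩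
  by_cases hR : d = 'R'
  · subst hR; rw [stepR_eq width height hh g]
    exact ⟨by rw [pvLen_writes]; exact hs.1, fun i hi => by rw [pvRL_writes]; exact hs.2 i hi⟩
  by_cases hL : d = 'L'
  · subst hL; rw [stepL_eq width height hw g]
    exact ⟨by rw [pvLen_writes]; exact hs.1, fun i hi => by rw [pvRL_writes]; exact hs.2 i hi⟩
  rw [step_other width height g d hU hD hR hL]; exact hs

-- ----- reductions of one offset step -----
theorem pvOffStep_U (s : Int × Int × Int × Int × Int × Int) :
    pvOffStep s 'U' = (s.1 + 1, s.2.1, min s.2.2.1 (s.1 + 1), max s.2.2.2.1 (s.1 + 1),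
      min s.2.2.2.2.1 s.2.1, max s.2.2.2.2.2 s.2.1) := by simp [pvOffStep]
theorem pvOffStep_D (s : Int × Int × Int × Int × Int × Int) :
    pvOffStep s 'D' = (s.1 - 1, s.2.1, min s.2.2.1 (s.1 - 1), max s.2.2.2.1 (s.1 - 1),
      min s.2.2.2.2.1 s.2.1, max s.2.2.2.2.2 s.2.1) := by simp [pvOffStep]
theorem pvOffStep_R (s : Int × Int × Int × Int × Int × Int) :
    pvOffStep s 'R' = (s.1, s.2.1 - 1, min s.2.2.1 s.1, max s.2.2.2.1 s.1,
      min s.2.2.2.2.1 (s.2.1 - 1), max s.2.2.2.2.2 (s.2.1 - 1)) := by simp [pvOffStep]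
theorem pvOffStep_L (s : Int × Int × Int × Int × Int × Int) :
    pvOffStep s 'L' = (s.1, s.2.1 + 1, min s.2.2.1 s.1, max s.2.2.2.1 s.1,
      min s.2.2.2.2.1 (s.2.1 + 1), max s.2.2.2.2.2 (s.2.1 + 1)) := by simp [pvOffStep]
theorem pvOffStep_other (s : Int × Int × Int × Int × Int × Int) (d : Char)
    (h1 : d ≠ 'U') (h2 : d ≠ 'D') (h3 : d ≠ 'R') (h4 : d ≠ 'L') :
    pvOffStep s d = (s.1, s.2.1, min s.2.2.1 s.1, max s.2.2.2.1 s.1,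
      min s.2.2.2.2.1 s.2.1, max s.2.2.2.2.2 s.2.1) := by simp [pvOffStep, h1, h2, h3, h4]

-- ----- the offset state stays ordered: min ≤ current ≤ max, min ≤ 0 ≤ max -----
theorem pvOffsets_bounds (ws : List Char) :
    (pvOffsets ws).2.2.1 ≤ (pvOffsets ws).1 ∧ (pvOffsets ws).1 ≤ (pvOffsets ws).2.2.2.1 ∧
    (pvOffsets ws).2.2.1 ≤ 0 ∧ 0 ≤ (pvOffsets ws).2.2.2.1 ∧
    (pvOffsets ws).2.2.2.2.1 ≤ (pvOffsets ws).2.1 ∧ (pvOffsets ws).2.1 ≤ (pvOffsets ws).2.2.2.2.2 ∧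
    (pvOffsets ws).2.2.2.2.1 ≤ 0 ∧ 0 ≤ (pvOffsets ws).2.2.2.2.2 := by
  induction ws using List.reverseRecOn with
  | nil => simp [pvOffsets]
  | append_singleton ws d ih =>
    have hoff : pvOffsets (ws ++ [d]) = pvOffStep (pvOffsets ws) d := by
      simp [pvOffsets, List.foldl_append]
    rw [hoff]
    rcases hsval : pvOffsets ws with ⟨r, c, mr, MR, mc, MC⟩
    rw [hsval] at ih
    simp only at ih
    by_cases hU : d = 'U'
    · subst hU; simp only [pvOffStep_U]; simp; omega
    by_cases hD : d = 'D'
    · subst hD; simp only [pvOffStep_D]; simp; omega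
    by_cases hR : d = 'R'
    · subst hR; simp only [pvOffStep_R]; simp; omega
    by_cases hL : d = 'L'
    · subst hL; simp only [pvOffStep_L]; simp; omega
    · simp only [pvOffStep_other _ d hU hD hR hL]; simp; omega

-- ----- main invariant: the grid after any wind prefix, in terms of the offsets -----
theorem grid_char (width height : Int) (hh : 0 ≤ height) (hw : 0 ≤ width)
    (ws : List Char) (g : List (List Int)) (hs : pvWindowed g height.toNat width.toNat) :
    pvWindowed (ws.foldl (pvWindStepA width height) g) height.toNat width.toNat ∧
    (∀ i j, ¬(i < height.toNat ∧ j < width.toNat) →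
      pvCell (ws.foldl (pvWindStepA width height) g) i j = pvCell g i j) ∧
    ∀ i < height.toNat, ∀ j < width.toNat,
      pvCell (ws.foldl (pvWindStepA width height) g) i j =
        if (pvOffsets ws).2.2.2.1 ≤ (i : Int) + (pvOffsets ws).1 ∧
           (i : Int) + (pvOffsets ws).1 < height + (pvOffsets ws).2.2.1 ∧
           (pvOffsets ws).2.2.2.2.2 ≤ (j : Int) + (pvOffsets ws).2.1 ∧
           (j : Int) + (pvOffsets ws).2.1 < width + (pvOffsets ws).2.2.2.2.1
        then pvCell g ((i : Int) + (pvOffsets ws).1).toNat ((j : Int) + (pvOffsets ws).2.1).toNat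
        else 0 := by
  induction ws using List.reverseRecOn with
  | nil =>
    refine ⟨hs, fun i j _ => rfl, fun i hi j hj => ?_⟩
    have ho : pvOffsets ([] : List Char) = (0, 0, 0, 0, 0, 0) := rfl
    simp only [List.foldl_nil, ho]
    rw [if_pos (by refine ⟨by omega, by omega, by omega, by omega⟩)]
    simp
  | append_singleton ws d ih =>
    obtain ⟨ihs, iho, ihc⟩ := ih
    have hfold : (ws ++ [d]).foldl (pvWindStepA width height) g =
        pvWindStepA width height (ws.foldl (pvWindStepA width height) g) d := by
      rw [List.foldl_append]; rfl
    have hoff : pvOffsets (ws ++ [d]) = pvOffStep (pvOffsets ws) d := by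
      simp [pvOffsets, List.foldl_append]
    have hb := pvOffsets_bounds ws
    rcases hsval : pvOffsets ws with ⟨r, c, mr, MR, mc, MC⟩
    rw [hsval] at ihc hb hoff
    simp only at ihc hb
    refine ⟨by rw [hfold]; exact shaped_step width height hh hw _ d ihs,
      fun i j hout => by
        rw [hfold, cell_step_out width height hh hw _ d i j hout]; exact iho i j hout,
      fun i hi j hj => ?_⟩
    rw [hfold, hoff]
    obtain ⟨hb1, hb2, hb3, hb4, hb5, hb6, hb7, hb8⟩ := hb
    by_cases hU : d = 'U'
    · subst hU
      simp only [pvOffStep_U]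
      rw [cell_stepU width height hh hw _ ihs i j hi hj]
      by_cases h1 : i + 1 < height.toNat
      · rw [if_pos h1, ihc (i + 1) h1 j hj]
        have harg : ((i + 1 : Nat) : Int) + r = (i : Int) + (r + 1) := by push_cast; ring
        rw [harg]
        refine if_congr ?_ rfl rfl
        constructor <;> intro hcond <;> exact ⟨by omega, by omega, by omega, by omega⟩
      · rw [if_neg h1, if_neg (by intro hcond; omega)]
    by_cases hD : d = 'D'
    · subst hD
      simp only [pvOffStep_D]
      rw [cell_stepD width height hh hw _ ihs i j hi hj]
      by_cases h1 : 1 ≤ i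
      · rw [if_pos h1, ihc (i - 1) (by omega) j hj]
        have harg : ((i - 1 : Nat) : Int) + r = (i : Int) + (r - 1) := by omega
        rw [harg]
        refine if_congr ?_ rfl rfl
        constructor <;> intro hcond <;> exact ⟨by omega, by omega, by omega, by omega⟩
      · rw [if_neg h1, if_neg (by intro hcond; omega)]
    by_cases hR : d = 'R'
    · subst hR
      simp only [pvOffStep_R]
      rw [cell_stepR width height hh hw _ ihs i j hi hj]
      by_cases h1 : 1 ≤ j
      · rw [if_pos h1, ihc i hi (j - 1) (by omega)]
        have harg : ((j - 1 : Nat) : Int) + c = (j : Int) + (c - 1) := by omega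
        rw [harg]
        refine if_congr ?_ rfl rfl
        constructor <;> intro hcond <;> exact ⟨by omega, by omega, by omega, by omega⟩
      · rw [if_neg h1, if_neg (by intro hcond; omega)]
    by_cases hL : d = 'L'
    · subst hL
      simp only [pvOffStep_L]
      rw [cell_stepL width height hh hw _ ihs i j hi hj]
      by_cases h1 : j + 1 < width.toNat
      · rw [if_pos h1, ihc i hi (j + 1) h1]
        have harg : ((j + 1 : Nat) : Int) + c = (j : Int) + (c + 1) := by push_cast; ring
        rw [harg]
        refine if_congr ?_ rfl rfl
        constructor <;> intro hcond <;> exact ⟨by omega, by omega, by omega, by omega⟩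
      · rw [if_neg h1, if_neg (by intro hcond; omega)]
    · rw [step_other width height _ d hU hD hR hL]
      simp only [pvOffStep_other _ d hU hD hR hL]
      rw [ihc i hi j hj]
      refine if_congr ?_ rfl rfl
      constructor <;> intro hcond <;> exact ⟨by omega, by omega, by omega, by omega⟩


-- ----- summation helpers -----
theorem pvMapGetDRange {α : Type} (l : List α) (d : α) (n : Nat) (h : l.length = n) :
    (List.range n).map (fun i => l.getD i d) = l := by
  subst h
  apply List.ext_getElem
  · simp
  · intro i h1 h2
    simp [List.getD_eq_getElem?_getD, List.getElem?_eq_getElem h2]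

-- a windowed indicator sum over range H collapses to the sum over the window
theorem pvSumWindow (G : Nat → Int) (off lo : Nat) :
    ∀ (H hi : Nat), hi ≤ H →
    ((List.range H).map (fun i => if lo ≤ i ∧ i < hi then G (off + (i - lo)) else 0)).sum
      = ((List.range (hi - lo)).map (fun k => G (off + k))).sum := by
  intro H
  induction H with
  | zero =>
    intro hi h
    have : hi = 0 := by omega
    subst this; simp
  | succ H ih =>
    intro hi hhi
    rw [List.range_succ, List.map_append, List.sum_append]
    by_cases hcase : hi ≤ H
    · rw [ih hi hcase, List.map_singleton, List.sum_singleton,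
          if_neg (by omega), add_zero]
    · have hhi' : hi = H + 1 := by omega
      subst hhi'
      have hfront : (List.range H).map (fun i => if lo ≤ i ∧ i < H + 1 then G (off + (i - lo)) else 0)
          = (List.range H).map (fun i => if lo ≤ i ∧ i < H then G (off + (i - lo)) else 0) := by
        apply List.map_congr_left
        intro i hiH
        rw [List.mem_range] at hiH
        by_cases hl : lo ≤ i
        · rw [if_pos ⟨hl, by omega⟩, if_pos ⟨hl, hiH⟩]
        · rw [if_neg (by tauto), if_neg (by tauto)]
      rw [hfront, ih H (le_refl H), List.map_singleton, List.sum_singleton]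
      by_cases hlo : lo ≤ H
      · rw [if_pos ⟨hlo, by omega⟩]
        have h1 : H + 1 - lo = (H - lo) + 1 := by omega
        rw [h1, List.range_succ, List.map_append, List.sum_append,
            List.map_singleton, List.sum_singleton]
      · have h0 : H + 1 - lo = 0 := by omega
        have h0' : H - lo = 0 := by omega
        rw [if_neg (by tauto), h0, h0']
        simp

-- with an empty field every wind pass iterates over zero cells and leaves the grid alone
theorem pvWindStepA_trivial (width height : Int) (h : height ≤ 0 ∨ width ≤ 0)
    (g : List (List Int)) (d : Char) :
    pvWindStepA width height g d = g := by
  rcases h with h | h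
  · unfold pvWindStepA
    have hr0 : PySem.List.pyRange 0 height 1 = [] := PySem.List.pyRange_one_eq_nil (by omega)
    have hr1 : PySem.List.pyRange (height - 1) (-1) (-1) = [] :=
      PySem.List.pyRange_neg_one_eq_nil (by omega)
    by_cases hU : d = 'U'
    · rw [if_pos hU, hr0, List.foldl_nil]
    rw [if_neg hU]
    by_cases hD : d = 'D'
    · rw [if_pos hD, hr1, List.foldl_nil]
    rw [if_neg hD]
    by_cases hR : d = 'R'
    · rw [if_pos hR, hr0, List.foldl_nil]
    rw [if_neg hR]
    by_cases hL : d = 'L'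
    · rw [if_pos hL, hr0, List.foldl_nil]
    rw [if_neg hL]
  · unfold pvWindStepA
    have hc0 : PySem.List.pyRange 0 width 1 = [] := PySem.List.pyRange_one_eq_nil (by omega)
    have hc1 : PySem.List.pyRange (width - 1) (-1) (-1) = [] :=
      PySem.List.pyRange_neg_one_eq_nil (by omega)
    by_cases hU : d = 'U'
    · rw [if_pos hU, hc0]
      simp only [List.foldl_nil]
      exact List.foldl_fixed _
    rw [if_neg hU]
    by_cases hD : d = 'D'
    · rw [if_pos hD, hc0]
      simp only [List.foldl_nil]
      exact List.foldl_fixed _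
    rw [if_neg hD]
    by_cases hR : d = 'R'
    · rw [if_pos hR, hc1]
      simp only [List.foldl_nil]
      exact List.foldl_fixed _
    rw [if_neg hR]
    by_cases hL : d = 'L'
    · rw [if_pos hL, hc0]
      simp only [List.foldl_nil]
      exact List.foldl_fixed _
    rw [if_neg hL]

theorem fold_trivial (width height : Int) (h : height ≤ 0 ∨ width ≤ 0)
    (ws : List Char) (g : List (List Int)) :
    ws.foldl (pvWindStepA width height) g = g := by
  induction ws generalizing g with
  | nil => rfl
  | cons d t iht => rw [List.foldl_cons, pvWindStepA_trivial width height h]; exact iht g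

theorem fold_nodir (width height : Int) (ws : List Char)
    (h : ¬∃ d ∈ ws, d = 'U' ∨ d = 'D' ∨ d = 'R' ∨ d = 'L') (g : List (List Int)) :
    ws.foldl (pvWindStepA width height) g = g := by
  induction ws generalizing g with
  | nil => rfl
  | cons d t iht =>
    push_neg at h
    have hd := h d (List.mem_cons_self ..)
    rw [List.foldl_cons, step_other width height g d hd.1 hd.2.1 hd.2.2.1 hd.2.2.2]
    exact iht (by push_neg; exact fun x hx => h x (List.mem_cons_of_mem _ hx)) g

theorem pvOffsets_nodir (ws : List Char)
    (h : ¬∃ d ∈ ws, d = 'U' ∨ d = 'D' ∨ d = 'R' ∨ d = 'L') :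
    pvOffsets ws = (0, 0, 0, 0, 0, 0) := by
  induction ws using List.reverseRecOn with
  | nil => rfl
  | append_singleton ws d ih =>
    push_neg at h
    have hd := h d (by simp)
    have hoff : pvOffsets (ws ++ [d]) = pvOffStep (pvOffsets ws) d := by
      simp [pvOffsets, List.foldl_append]
    rw [hoff, ih (by push_neg; exact fun x hx => h x (by simp [hx])),
        pvOffStep_other _ d hd.1 hd.2.1 hd.2.2.1 hd.2.2.2]
    simp

theorem fold_dims (width height : Int) (hh : 0 ≤ height) (hw : 0 ≤ width)
    (ws : List Char) (g : List (List Int)) :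
    (ws.foldl (pvWindStepA width height) g).length = g.length ∧
    ∀ i, pvRL (ws.foldl (pvWindStepA width height) g) i = pvRL g i := by
  induction ws generalizing g with
  | nil => exact ⟨rfl, fun _ => rfl⟩
  | cons d t iht =>
    rw [List.foldl_cons]
    obtain ⟨h1, h2⟩ := iht (pvWindStepA width height g d)
    obtain ⟨h3, h4⟩ := pvDims_step width height hh hw g d
    exact ⟨by rw [h1, h3], fun i => by rw [h2 i, h4 i]⟩

-- full-row and field-window row sums
def pvRowFull (g : List (List Int)) (i : Nat) : Int :=
  ((List.range (pvRL g i)).map (fun j => pvCell g i j)).sum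
def pvWinRow (W : Nat) (g : List (List Int)) (i : Nat) : Int :=
  ((List.range W).map (fun j => pvCell g i j)).sum

theorem pvS_eq (g : List (List Int)) :
    (g.map (fun row => row.sum)).sum = ((List.range g.length).map (pvRowFull g)).sum := by
  conv_lhs => rw [← pvMapGetDRange (g.map (fun row => row.sum)) 0 g.length (by simp)]
  refine congrArg List.sum (List.map_congr_left ?_)
  intro i hi
  rw [List.mem_range] at hi
  have h1 : (g.map (fun row => row.sum)).getD i 0 = (g.getD i []).sum := by
    rw [List.getD_eq_getElem?_getD, List.getD_eq_getElem?_getD, List.getElem?_map,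
        List.getElem?_eq_getElem hi]
    rfl
  rw [h1, pvRowFull, ← pvMapGetDRange (g.getD i []) 0 (pvRL g i) rfl]
  rfl

theorem pvRowFull_split (g : List (List Int)) (i : Nat) (W : Nat) (hW : W ≤ pvRL g i) :
    pvRowFull g i = pvWinRow W g i
      + ((List.range (pvRL g i - W)).map (fun k => pvCell g i (W + k))).sum := by
  conv_lhs => rw [pvRowFull, show pvRL g i = W + (pvRL g i - W) from by omega]
  rw [List.range_add, List.map_append, List.sum_append, List.map_map]
  rfl

theorem pvDropTakeSum (l : List Int) (a n : Nat) (h : n = 0 ∨ a + n ≤ l.length) :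
    ((l.drop a).take n).sum = ((List.range n).map (fun k => l.getD (a + k) 0)).sum := by
  rcases h with h | h
  · subst h
    simp
  have he : (l.drop a).take n = (List.range n).map (fun k => l.getD (a + k) 0) := by
    apply List.ext_getElem
    · simp
      omega
    · intro i h1 h2
      simp only [List.getElem_take, List.getElem_drop, List.getElem_map, List.getElem_range,
        List.getD_eq_getElem?_getD]
      rw [List.getElem?_eq_getElem (by simp at h1; omega)]
      rfl
  rw [he]

theorem pvTakeSum (l : List Int) (n : Nat) (h : n ≤ l.length) :
    (l.take n).sum = ((List.range n).map (fun k => l.getD k 0)).sum := by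
  have := pvDropTakeSum l 0 n (Or.inr (by omega))
  simpa using this

-- ===== VERDICT (by name: the statement is the Claim_ definition above) =====
theorem remaining_leaves_spec : Claim_equal_remaining_leaves := by
  unfold Claim_equal_remaining_leaves
  intro width height leaves winds _hdom hpre
  unfold Spec_remaining_leaves
  have hb := pvOffsets_bounds winds.toList
  rcases hsval : pvOffsets winds.toList with ⟨r, c, mr, MR, mc, MC⟩
  rw [hsval] at hb
  simp only at hb
  obtain ⟨hb1, hb2, hb3, hb4, hb5, hb6, hb7, hb8⟩ := hb
  simp only [remaining_leaves, remaining_leaves_alt, hsval]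
  by_cases hdir : winds.toList.any (fun d => d == 'U' || d == 'D' || d == 'R' || d == 'L') = true
  case neg =>
    have hnodir : ¬∃ d ∈ winds.toList, d = 'U' ∨ d = 'D' ∨ d = 'R' ∨ d = 'L' := by
      rintro ⟨d, hd, hcase⟩
      exact hdir (List.any_eq_true.mpr ⟨d, hd, by rcases hcase with h | h | h | h <;> simp [h]⟩)

    -- no directional wind: the grid is untouched and nothing is lost
    have hzero := pvOffsets_nodir winds.toList hnodir
    rw [hsval] at hzero
    simp only [Prod.mk.injEq] at hzero
    obtain ⟨e1, e2, e3, e4, e5, e6⟩ := hzero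
    subst e1; subst e2; subst e3; subst e4; subst e5; subst e6
    rw [fold_nodir width height winds.toList hnodir]
    have hlost : (PySem.List.pyRange 0 (min height (leaves.length : Int)) 1).foldl
        (fun lost i =>
          lost + ((PySem.List.slice (PySem.List.pyGetD leaves i []) none
                (some (max (min width ((PySem.List.pyGetD leaves i []).length : Int)) 0))).sum -
            if 0 ≤ i ∧ i < height + 0 then
              (PySem.List.slice (PySem.List.pyGetD leaves i []) (some 0)
                  (some (max (min (width + 0) (max (min width ((PySem.List.pyGetD leaves i []).length : Int)) 0)) 0))).sum
            else 0)) 0 = 0 := by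
      rw [PySem.List.foldl_congr_mem _ _ (fun acc _ => acc) 0 (fun acc i hi => by
        rw [PySem.List.mem_pyRange_one] at hi
        rw [if_pos ⟨by omega, by omega⟩,
            show max (min (width + 0) (max (min width ((PySem.List.pyGetD leaves i []).length : Int)) 0)) 0
               = max (min width ((PySem.List.pyGetD leaves i []).length : Int)) 0 from by omega,
            PySem.List.slice_zero_start]
        simp)]
      exact List.foldl_fixed _
    rw [hlost]
    omega
  case pos =>
    by_cases hhw : height ≤ 0 ∨ width ≤ 0
    · -- empty field: the grid is untouched and nothing is lost
      rw [fold_trivial width height hhw]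
      have hlost : (PySem.List.pyRange 0 (min height (leaves.length : Int)) 1).foldl
          (fun lost i =>
            lost + ((PySem.List.slice (PySem.List.pyGetD leaves i []) none
                  (some (max (min width ((PySem.List.pyGetD leaves i []).length : Int)) 0))).sum -
              if MR ≤ i ∧ i < height + mr then
                (PySem.List.slice (PySem.List.pyGetD leaves i []) (some MC)
                    (some (max (min (width + mc) (max (min width ((PySem.List.pyGetD leaves i []).length : Int)) 0)) 0))).sum
              else 0)) 0 = 0 := by
        rcases hhw with h | h
        · rw [show PySem.List.pyRange 0 (min height (leaves.length : Int)) 1 = [] from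
              PySem.List.pyRange_one_eq_nil (by omega), List.foldl_nil]
        · rw [PySem.List.foldl_congr_mem _ _ (fun acc _ => acc) 0 (fun acc i hi => by
            rw [PySem.List.mem_pyRange_one] at hi
            rw [show max (min width ((PySem.List.pyGetD leaves i []).length : Int)) 0 = 0 from by omega,
                show max (min (width + mc) (0:Int)) 0 = 0 from by omega]
            have hf : (PySem.List.slice (PySem.List.pyGetD leaves i []) none (some (0:Int))).sum = 0 := by
              rw [PySem.List.slice_to _ (le_refl 0)]
              simp
            have hk : (PySem.List.slice (PySem.List.pyGetD leaves i []) (some MC) (some (0:Int))).sum = 0 := by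
              rw [PySem.List.slice_toNat _ (by omega) (le_refl 0)]
              simp
            rw [hf]
            by_cases hc : MR ≤ i ∧ i < height + mr
            · rw [if_pos hc, hk]
              simp
            · rw [if_neg hc]
              simp)]
          exact List.foldl_fixed _
      rw [hlost]
      omega
    · -- a real field: Pre_ supplies it, the invariant gives every cell
      push_neg at hhw
      obtain ⟨hh1, hw1⟩ := hhw
      obtain ⟨hwin1, hwin2⟩ := hpre ⟨hdir, hh1, hw1⟩
      have hh : (0:Int) ≤ height := le_of_lt hh1
      have hw : (0:Int) ≤ width := le_of_lt hw1
      have hwin : pvWindowed leaves height.toNat width.toNat := by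
        refine ⟨by omega, fun i hi => ?_⟩
        have hi' : i < leaves.length := by omega
        have hlt : i < (leaves.take height.toNat).length := by
          rw [List.length_take]; omega
        have hmem : leaves[i] ∈ leaves.take height.toNat := by
          have e : (leaves.take height.toNat)[i]'hlt = leaves[i] := List.getElem_take
          rw [← e]
          exact List.getElem_mem hlt
        have hrow := hwin2 _ hmem
        have hget : leaves.getD i [] = leaves[i] := by
          rw [List.getD_eq_getElem?_getD, List.getElem?_eq_getElem hi']
          rfl
        rw [pvRL, hget]
        omega
      obtain ⟨hGw, hGout, hGc⟩ := grid_char width height hh hw winds.toList leaves hwin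
      rw [hsval] at hGc
      simp only at hGc
      obtain ⟨hdlen, hdRL⟩ := fold_dims width height hh hw winds.toList leaves
      set H := height.toNat with hHdef
      set W := width.toNat with hWdef
      set G := winds.toList.foldl (pvWindStepA width height) leaves with hGdef
      set loR := (MR - r).toNat with hloR
      set hiR := (height + mr - r).toNat with hhiR
      set loC := (MC - c).toNat with hloC
      set hiC := (width + mc - c).toNat with hhiC
      -- only the field changes, row by row
      have hrowEq : ∀ i ∈ List.range leaves.length,
          pvRowFull G i + (if i < H then pvWinRow W leaves i else 0)
            = pvRowFull leaves i + (if i < H then pvWinRow W G i else 0) := by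
        intro i hi
        rw [List.mem_range] at hi
        by_cases hiH : i < H
        · have hWle : W ≤ pvRL leaves i := hwin.2 i hiH
          have hWleG : W ≤ pvRL G i := by rw [hdRL i]; exact hWle
          rw [if_pos hiH, if_pos hiH, pvRowFull_split G i W hWleG,
              pvRowFull_split leaves i W hWle, hdRL i,
              List.map_congr_left (l := List.range (pvRL leaves i - W))
                (fun k _ => hGout i (W + k) (by omega))]
          ring
        · rw [if_neg hiH, if_neg hiH, pvRowFull, pvRowFull, hdRL i,
              List.map_congr_left (l := List.range (pvRL leaves i))
                (fun j _ => hGout i j (by omega))]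
      have hSplit : ((List.range leaves.length).map (pvRowFull G)).sum
            + ((List.range leaves.length).map (fun i => if i < H then pvWinRow W leaves i else 0)).sum
          = ((List.range leaves.length).map (pvRowFull leaves)).sum
            + ((List.range leaves.length).map (fun i => if i < H then pvWinRow W G i else 0)).sum := by
        rw [← PySem.List.sum_map_add_int, ← PySem.List.sum_map_add_int]
        exact congrArg List.sum (List.map_congr_left hrowEq)
      have hWinIf : ∀ g' : List (List Int),
          ((List.range leaves.length).map (fun i => if i < H then pvWinRow W g' i else 0)).sum
            = ((List.range H).map (pvWinRow W g')).sum := by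
        intro g'
        rw [show leaves.length = H + (leaves.length - H) from by omega, List.range_add,
            List.map_append, List.sum_append, List.map_map,
            List.map_congr_left (l := List.range (leaves.length - H))
              (g := fun _ => (0:Int))
              (fun k _ => by
                show (if H + k < H then pvWinRow W g' (H + k) else (0:Int)) = 0
                rw [if_neg (by omega)])]
        simp only [List.map_const', List.sum_replicate, smul_zero, add_zero]
        refine congrArg List.sum (List.map_congr_left ?_)
        intro i hi
        rw [List.mem_range] at hi
        exact if_pos hi
      -- the field after all winds sums to the surviving rectangle of the original grid
      have hcellG : ∀ i, i < H → ∀ j, j < W → pvCell G i j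
          = (if loR ≤ i ∧ i < hiR then
              (if loC ≤ j ∧ j < hiC then
                pvCell leaves (MR.toNat + (i - loR)) (MC.toNat + (j - loC)) else 0) else 0) := by
        intro i hi j hj
        rw [hGc i hi j hj]
        by_cases hrow : loR ≤ i ∧ i < hiR
        · by_cases hcol : loC ≤ j ∧ j < hiC
          · rw [if_pos hrow, if_pos hcol, if_pos (by omega)]
            congr 1 <;> omega
          · rw [if_pos hrow, if_neg hcol, if_neg (by omega)]
        · rw [if_neg hrow, if_neg (by omega)]
      have hWinG : ((List.range H).map (pvWinRow W G)).sum
          = ((List.range (hiR - loR)).map (fun k =>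
              ((List.range (hiC - loC)).map (fun k' =>
                pvCell leaves (MR.toNat + k) (MC.toNat + k'))).sum)).sum := by
        have step1 : ((List.range H).map (pvWinRow W G)).sum
            = ((List.range H).map (fun (i : Nat) => if loR ≤ i ∧ i < hiR then
                ((List.range (hiC - loC)).map (fun k' =>
                  pvCell leaves (MR.toNat + (i - loR)) (MC.toNat + k'))).sum else 0)).sum := by
          refine congrArg List.sum (List.map_congr_left ?_)
          intro i hi
          rw [List.mem_range] at hi
          show pvWinRow W G i = _
          rw [pvWinRow, List.map_congr_left (l := List.range W)
                (f := fun j => pvCell G i j)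
                (g := fun j => if loR ≤ i ∧ i < hiR then
                  (if loC ≤ j ∧ j < hiC then
                    pvCell leaves (MR.toNat + (i - loR)) (MC.toNat + (j - loC)) else 0) else 0)
                (fun j hj => by rw [List.mem_range] at hj; exact hcellG i hi j hj)]
          by_cases hrow : loR ≤ i ∧ i < hiR
          · rw [if_pos hrow, List.map_congr_left (l := List.range W)
                (f := fun j => if loR ≤ i ∧ i < hiR then
                  (if loC ≤ j ∧ j < hiC then
                    pvCell leaves (MR.toNat + (i - loR)) (MC.toNat + (j - loC)) else 0) else 0)
                (g := fun j => if loC ≤ j ∧ j < hiC then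
                  pvCell leaves (MR.toNat + (i - loR)) (MC.toNat + (j - loC)) else 0)
                (fun j _ => if_pos hrow)]
            exact pvSumWindow (fun k => pvCell leaves (MR.toNat + (i - loR)) k)
              MC.toNat loC W hiC (by omega)
          · rw [if_neg hrow, List.map_congr_left (l := List.range W)
                (f := fun j => if loR ≤ i ∧ i < hiR then
                  (if loC ≤ j ∧ j < hiC then
                    pvCell leaves (MR.toNat + (i - loR)) (MC.toNat + (j - loC)) else 0) else 0)
                (g := fun _ => (0:Int)) (fun j _ => if_neg hrow)]
            simp
        rw [step1]
        exact pvSumWindow (fun k => ((List.range (hiC - loC)).map (fun k' =>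
          pvCell leaves k (MC.toNat + k'))).sum) MR.toNat loR H hiR (by omega)
      -- the port's lost loop: each field row loses its window sum minus the kept slice
      have hlostEq : (PySem.List.pyRange 0 (min height (leaves.length : Int)) 1).foldl
          (fun lost i =>
            lost + ((PySem.List.slice (PySem.List.pyGetD leaves i []) none
                  (some (max (min width ((PySem.List.pyGetD leaves i []).length : Int)) 0))).sum -
              if MR ≤ i ∧ i < height + mr then
                (PySem.List.slice (PySem.List.pyGetD leaves i []) (some MC)
                    (some (max (min (width + mc) (max (min width ((PySem.List.pyGetD leaves i []).length : Int)) 0)) 0))).sum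
              else 0)) 0
          = ((List.range H).map (fun (i : Nat) =>
              pvWinRow W leaves i -
                (if MR ≤ (i:Int) ∧ (i:Int) < height + mr then
                  ((List.range (hiC - loC)).map (fun k => pvCell leaves i (MC.toNat + k))).sum
                else 0))).sum := by
        rw [min_eq_left (by exact_mod_cast hwin1), PySem.List.pyRange_one 0 height]
        simp only [Int.sub_zero, zero_add, ← hHdef]
        rw [List.foldl_map]
        have houter : ∀ (acc : Int), ∀ i ∈ List.range H,
            acc + ((PySem.List.slice (PySem.List.pyGetD leaves (i:Int) []) none
                  (some (max (min width ((PySem.List.pyGetD leaves (i:Int) []).length : Int)) 0))).sum -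
              (if MR ≤ (i:Int) ∧ (i:Int) < height + mr then
                (PySem.List.slice (PySem.List.pyGetD leaves (i:Int) []) (some MC)
                    (some (max (min (width + mc) (max (min width ((PySem.List.pyGetD leaves (i:Int) []).length : Int)) 0)) 0))).sum
              else 0))
            = acc + (pvWinRow W leaves i -
                (if MR ≤ (i:Int) ∧ (i:Int) < height + mr then
                  ((List.range (hiC - loC)).map (fun k => pvCell leaves i (MC.toNat + k))).sum
                else 0)) := by
          intro acc i hi
          rw [List.mem_range] at hi
          have hrlW := hwin.2 i hi
          have hrl : ((PySem.List.pyGetD leaves (i:Int) []).length : Int) = ((pvRL leaves i : Nat) : Int) := by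
            rw [PySem.List.pyGetD_natCast]
            rfl
          rw [hrl, show max (min width ((pvRL leaves i : Nat) : Int)) 0 = width from by omega]
          have hfield : (PySem.List.slice (PySem.List.pyGetD leaves (i:Int) []) none (some width)).sum
              = pvWinRow W leaves i := by
            rw [PySem.List.slice_to _ hw, PySem.List.pyGetD_natCast, ← hWdef,
                pvTakeSum (leaves.getD i []) W (by have : (leaves.getD i []).length = pvRL leaves i := rfl; omega),
                pvWinRow]
            refine congrArg List.sum (List.map_congr_left ?_)
            intro j _
            rw [pvCell]
          rw [hfield]
          by_cases hcond : MR ≤ (i:Int) ∧ (i:Int) < height + mr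
          · rw [if_pos hcond, if_pos hcond]
            have hkept : (PySem.List.slice (PySem.List.pyGetD leaves (i:Int) []) (some MC)
                (some (max (min (width + mc) width) 0))).sum
                = ((List.range (hiC - loC)).map (fun k => pvCell leaves i (MC.toNat + k))).sum := by
              rw [PySem.List.slice_toNat _ (by omega) (by omega), PySem.List.pyGetD_natCast,
                  show (max (min (width + mc) width) 0).toNat - MC.toNat = hiC - loC from by omega,
                  pvDropTakeSum (leaves.getD i []) MC.toNat (hiC - loC) (by
                    have he : (leaves.getD i []).length = pvRL leaves i := rfl
                    omega)]
              refine congrArg List.sum (List.map_congr_left ?_)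
              intro k _
              rw [pvCell]
            rw [hkept]
          · rw [if_neg hcond, if_neg hcond]
        rw [PySem.List.foldl_congr_mem _ _ _ 0 houter, PySem.List.foldl_add, zero_add]
      -- the kept slices over all field rows are exactly the surviving rectangle
      have hKept : ((List.range H).map (fun (i : Nat) =>
            if MR ≤ (i:Int) ∧ (i:Int) < height + mr then
              ((List.range (hiC - loC)).map (fun k => pvCell leaves i (MC.toNat + k))).sum
            else 0)).sum
          = ((List.range (hiR - loR)).map (fun k =>
              ((List.range (hiC - loC)).map (fun k' =>
                pvCell leaves (MR.toNat + k) (MC.toNat + k'))).sum)).sum := by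
        have step1 : ((List.range H).map (fun (i : Nat) =>
              if MR ≤ (i:Int) ∧ (i:Int) < height + mr then
                ((List.range (hiC - loC)).map (fun k => pvCell leaves i (MC.toNat + k))).sum
              else 0)).sum
            = ((List.range H).map (fun (i : Nat) =>
                if MR.toNat ≤ i ∧ i < (height + mr).toNat then
                  ((List.range (hiC - loC)).map (fun k =>
                    pvCell leaves (MR.toNat + (i - MR.toNat)) (MC.toNat + k))).sum
                else 0)).sum := by
          refine congrArg List.sum (List.map_congr_left ?_)
          intro i hi
          rw [List.mem_range] at hi
          by_cases hrow : MR.toNat ≤ i ∧ i < (height + mr).toNat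
          · rw [if_pos (by omega), if_pos hrow]
            conv_lhs => rw [show i = MR.toNat + (i - MR.toNat) from by omega]
          · rw [if_neg (by omega), if_neg hrow]
        rw [step1,
            pvSumWindow (fun t => ((List.range (hiC - loC)).map (fun k' =>
              pvCell leaves t (MC.toNat + k'))).sum) MR.toNat MR.toNat H (height + mr).toNat (by omega),
            show (height + mr).toNat - MR.toNat = hiR - loR from by omega]
      -- each row's loss plus its kept part is the row's field sum
      have hdiff : ((List.range H).map (fun (i : Nat) =>
            pvWinRow W leaves i -
              (if MR ≤ (i:Int) ∧ (i:Int) < height + mr then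
                ((List.range (hiC - loC)).map (fun k => pvCell leaves i (MC.toNat + k))).sum
              else 0))).sum
          + ((List.range H).map (fun (i : Nat) =>
              if MR ≤ (i:Int) ∧ (i:Int) < height + mr then
                ((List.range (hiC - loC)).map (fun k => pvCell leaves i (MC.toNat + k))).sum
              else 0)).sum
          = ((List.range H).map (pvWinRow W leaves)).sum := by
        rw [← PySem.List.sum_map_add_int]
        refine congrArg List.sum (List.map_congr_left ?_)
        intro i _
        simp
      rw [pvS_eq, pvS_eq, hdlen, hlostEq]
      have h1 := hWinIf G
      have h2 := hWinIf leaves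
      omega
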